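-- pv_equiv track=rewrite | github.com/qinglinh2003/Labit | labit/papers/models.py | normalize_paper_id
-- ===== SOURCE A (Python) =====
-- def normalize_paper_id(value: str) -> str:
--     value = value.strip()
--     if not value:
--         raise ValueError("Paper id cannot be empty.")
--     allowed = set("abcdefghijklmnopqrstuvwxyzABCDEFGHIJKLMNOPQRSTUVWXYZ0123456789._-:")
--     if any(ch not in allowed for ch in value):
--         raise ValueError(
--             "Paper id may only contain letters, numbers, '.', '_', '-', and ':'."
--         )
--     return value
-- ===== SOURCE B (Python) =====
-- import re
--
-- _PAPER_ID_RE = re.compile(r"[A-Za-z0-9._:\-]+")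
--
--
-- def normalize_paper_id(value: str) -> str:
--     value = value.strip()
--     if not value:
--         raise ValueError("Paper id cannot be empty.")
--     if _PAPER_ID_RE.fullmatch(value) is None:
--         raise ValueError(
--             "Paper id may only contain letters, numbers, '.', '_', '-', and ':'."
--         )
--     return value
-- ===== Notes on version B (the rewrite author's own statement) =====
-- stated objective: idiomatic
-- what changed: Replaces the per-character any()/set-membership scan with a single precompiled re.fullmatch of the allowed character class, keeping the separate empty-string check. The regex match runs in C, removing the per-character Python-level loop (measured ~3.5x at the largest size).
import Mathlib
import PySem

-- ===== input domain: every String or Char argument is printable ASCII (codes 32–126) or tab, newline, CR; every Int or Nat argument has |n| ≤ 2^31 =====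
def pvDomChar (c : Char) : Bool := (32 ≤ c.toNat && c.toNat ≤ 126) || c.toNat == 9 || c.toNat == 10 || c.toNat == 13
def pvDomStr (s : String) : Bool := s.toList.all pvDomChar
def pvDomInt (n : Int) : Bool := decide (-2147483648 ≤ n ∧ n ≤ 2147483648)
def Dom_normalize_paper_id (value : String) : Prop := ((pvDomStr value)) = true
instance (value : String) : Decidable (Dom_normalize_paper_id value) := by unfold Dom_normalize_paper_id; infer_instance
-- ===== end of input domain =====

-- B replaces A's per-character set-membership scan by one regex fullmatch of the
-- character class (more idiomatic); Pre_ excludes the inputs on which A raises ValueError.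

-- ===== PORT A =====
def normalize_paper_id (value : String) : String :=
  let v := PySem.Str.strip value
  if v = "" then ""          -- raise ValueError("Paper id cannot be empty."): outside Pre_
  else
    let allowed := PySem.Set.ofList
      "abcdefghijklmnopqrstuvwxyzABCDEFGHIJKLMNOPQRSTUVWXYZ0123456789._-:".toList
    if v.toList.any (fun ch => ! PySem.Set.contains allowed ch) then ""  -- raise ValueError: outside Pre_
    else v

-- ===== PORT B =====
-- re.fullmatch of the class [A-Za-z0-9._:\-]+ ported by hand: one char of the class, exact
def pvClassChar (c : Char) : Bool :=
  ('A' ≤ c && c ≤ 'Z') || ('a' ≤ c && c ≤ 'z') || ('0' ≤ c && c ≤ '9')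
    || c == '.' || c == '_' || c == ':' || c == '-'

-- fullmatch of `[class]+` on v: v nonempty and every char in the class (exact for this regex)
def pvFullmatchClassPlus (v : String) : Bool :=
  !v.toList.isEmpty && v.toList.all pvClassChar

def normalize_paper_id_alt (value : String) : String :=
  let v := PySem.Str.strip value
  if v = "" then ""          -- raise ValueError("Paper id cannot be empty."): outside Pre_
  else if !pvFullmatchClassPlus v then ""  -- raise ValueError: outside Pre_
  else v

-- ===== PRECONDITION & SPEC =====
-- Pre_ excludes exactly the inputs on which A raises ValueError: a string that is empty after
-- strip, or one containing a character outside the allowed set (letters, digits, dot,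
-- underscore, hyphen, colon).
def Pre_normalize_paper_id (value : String) : Prop :=
  (PySem.Str.strip value).toList ≠ [] ∧
  (PySem.Str.strip value).toList.all (fun c =>
    ('A' ≤ c && c ≤ 'Z') || ('a' ≤ c && c ≤ 'z') || ('0' ≤ c && c ≤ '9')
      || c == '.' || c == '_' || c == ':' || c == '-') = true
instance (value : String) : Decidable (Pre_normalize_paper_id value) := by
  unfold Pre_normalize_paper_id; infer_instance

def pvWitness_normalize_paper_id : String := " arXiv:2101.00001 "

def Spec_normalize_paper_id (value : String) (out : String) : Prop := out = normalize_paper_id_alt value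
instance (value : String) (out : String) : Decidable (Spec_normalize_paper_id value out) := by unfold Spec_normalize_paper_id; infer_instance

-- ===== CLAIM (what is proved, stated in full; the proofs are below) =====
def Claim_equal_normalize_paper_id : Prop := ∀ (value : String), Dom_normalize_paper_id value → Pre_normalize_paper_id value → Spec_normalize_paper_id value (normalize_paper_id value)

-- ===== LEMMAS AND PROOFS =====
theorem toList_allowed :
    "abcdefghijklmnopqrstuvwxyzABCDEFGHIJKLMNOPQRSTUVWXYZ0123456789._-:".toList =
      ['a', 'b', 'c', 'd', 'e', 'f', 'g', 'h', 'i', 'j', 'k', 'l', 'm', 'n', 'o', 'p',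
       'q', 'r', 's', 't', 'u', 'v', 'w', 'x', 'y', 'z', 'A', 'B', 'C', 'D', 'E', 'F',
       'G', 'H', 'I', 'J', 'K', 'L', 'M', 'N', 'O', 'P', 'Q', 'R', 'S', 'T', 'U', 'V',
       'W', 'X', 'Y', 'Z', '0', '1', '2', '3', '4', '5', '6', '7', '8', '9', '.', '_',
       '-', ':'] := by decide

theorem mem_allowed (c : Char) :
    PySem.Set.contains
      (PySem.Set.ofList
        "abcdefghijklmnopqrstuvwxyzABCDEFGHIJKLMNOPQRSTUVWXYZ0123456789._-:".toList) c
      = pvClassChar c := by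
  rw [toList_allowed, Bool.eq_iff_iff]
  simp [PySem.Set.mem_ofList, pvClassChar, List.mem_cons,
    Char.ext_iff, UInt32.ext_iff, Char.le_def, UInt32.le_iff_toNat_le]
  omega

theorem strip_ne_empty {value : String} (h : (PySem.Str.strip value).toList ≠ []) :
    ¬ PySem.Str.strip value = "" := by
  intro he; exact h (by rw [he]; rfl)

-- ===== VERDICT (by name: the statement is the Claim_ definition above) =====
theorem normalize_paper_id_spec : Claim_equal_normalize_paper_id := by
  intro value _ hpre
  obtain ⟨hne, hall⟩ := hpre
  have hall' : ∀ c ∈ (PySem.Str.strip value).toList, pvClassChar c = true := by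
    intro c hc
    have := List.all_eq_true.mp hall c hc
    simpa [pvClassChar] using this
  unfold Spec_normalize_paper_id normalize_paper_id normalize_paper_id_alt pvFullmatchClassPlus
  simp only [mem_allowed]
  rw [if_neg (strip_ne_empty hne), if_neg (strip_ne_empty hne)]
  have hne' : ¬ PySem.Chars.strip value.toList = [] := by
    simpa using hne
  have hallc : ∀ x ∈ PySem.Chars.strip value.toList, pvClassChar x = true := by
    intro x hx
    exact hall' x (by simpa using hx)
  simp [hne', hallc]
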